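-- pv_equiv track=rewrite | github.com/WashingtonYandun/DSA.py | algorithms/lists_algo/Level_1.py | segregate_elements
-- ===== SOURCE A (Python) =====
-- def segregate_elements(arr):
--     """
--     It segregates the negative numbers from the positive numbers in an array.
--
--     :param arr: The array to be sorted
--     :return: the array with the positive numbers first and the negative numbers second.
--     """
--     nArr = []
--     pArr = []
--     for i in arr:
--         if i < 0:
--             nArr.append(i)
--         else:
--             pArr.append(i)
--     arr = pArr + nArr
--     return arr
-- ===== SOURCE B (Python) =====
-- def segregate_elements(arr):
--     """Stable sort keyed on sign: non-negatives (key False) first, negatives (key True) last,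
--     original order preserved within each group."""
--     return sorted(arr, key=lambda x: x < 0)
-- ===== Notes on version B (the rewrite author's own statement) =====
-- stated objective: idiomatic
-- what changed: Replaced the explicit two-bucket partition loop with a single stable sort keyed on the sign predicate (sorted(arr, key=lambda x: x < 0)), whose stability reproduces pArr + nArr.
import Mathlib
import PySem

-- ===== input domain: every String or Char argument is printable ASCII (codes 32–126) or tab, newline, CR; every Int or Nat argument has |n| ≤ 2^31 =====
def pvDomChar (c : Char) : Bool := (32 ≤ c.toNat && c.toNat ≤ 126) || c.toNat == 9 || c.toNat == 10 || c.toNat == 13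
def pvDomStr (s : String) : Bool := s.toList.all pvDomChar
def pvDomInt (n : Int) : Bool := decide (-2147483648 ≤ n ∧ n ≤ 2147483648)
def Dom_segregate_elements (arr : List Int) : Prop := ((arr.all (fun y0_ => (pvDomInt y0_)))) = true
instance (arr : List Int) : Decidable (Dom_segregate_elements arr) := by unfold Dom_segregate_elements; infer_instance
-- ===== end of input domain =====

-- B replaces A's two-bucket partition loop with a single stable sort keyed on the
-- sign predicate (idiomatic one-liner); stability reproduces pArr + nArr exactly.


-- ===== PORT A =====
-- for i in arr: append to nArr if i < 0 else to pArr; return pArr + nArr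
def segregate_elements (arr : List Int) : List Int :=
  let st := arr.foldl
    (fun (s : List Int × List Int) i =>
      if i < 0 then (s.1 ++ [i], s.2) else (s.1, s.2 ++ [i]))
    ([], [])
  st.2 ++ st.1

-- ===== PORT B =====
-- sorted(arr, key=lambda x: x < 0): Python's bool key False/True sorts as 0/1
def segregate_elements_alt (arr : List Int) : List Int :=
  PySem.List.sorted arr (fun x => if x < 0 then (1 : Int) else 0) false

-- ===== PRECONDITION & SPEC =====
def Spec_segregate_elements (arr : List Int) (out : List Int) : Prop := out = segregate_elements_alt arr
instance (arr : List Int) (out : List Int) : Decidable (Spec_segregate_elements arr out) := by unfold Spec_segregate_elements; infer_instance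

-- ===== CLAIM (what is proved, stated in full; the proofs are below) =====
def Claim_equal_segregate_elements : Prop := ∀ (arr : List Int), Dom_segregate_elements arr → Spec_segregate_elements arr (segregate_elements arr)

-- ===== LEMMAS AND PROOFS =====

-- the sign key used by B
def pvKey (x : Int) : Int := if x < 0 then 1 else 0

theorem pv_ins_cons (bef : Int → Int → Bool) (x y : Int) (ys : List Int) :
    PySem.List.insertBy bef x (y :: ys) =
      if bef x y then x :: y :: ys else y :: PySem.List.insertBy bef x ys := by
  simp [PySem.List.insertBy]

theorem pv_ins_nil (bef : Int → Int → Bool) (x : Int) :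
    PySem.List.insertBy bef x [] = [x] := by
  simp [PySem.List.insertBy]

-- inserting x into 'non-negatives ++ negatives' puts it at the end of its group
theorem pv_insertBy_part (x : Int) :
    ∀ (p n : List Int), (∀ y ∈ p, ¬ y < 0) → (∀ y ∈ n, y < 0) →
      PySem.List.insertBy (fun a b => decide (pvKey a < pvKey b)) x (p ++ n) =
        if x < 0 then p ++ n ++ [x] else p ++ x :: n := by
  intro p
  induction p with
  | nil =>
    intro n _ hn
    induction n with
    | nil => by_cases hx : x < 0 <;> simp [pv_ins_nil, hx]
    | cons y ys ih =>
      have hy : y < 0 := hn y (by simp)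
      have ih' := ih (fun z hz => hn z (by simp [hz]))
      by_cases hx : x < 0
      · have hb : (decide (pvKey x < pvKey y)) = false := by simp [pvKey, hx, hy]
        rw [List.nil_append, pv_ins_cons, hb]
        simp only [List.nil_append, if_pos hx] at ih'
        simp [ih', hx]
      · have hb : (decide (pvKey x < pvKey y)) = true := by simp [pvKey, hx, hy]
        rw [List.nil_append, pv_ins_cons, hb]
        simp [hx]
  | cons q ps ih =>
    intro n hp hn
    have hq : ¬ q < 0 := hp q (by simp)
    have ih' := ih n (fun z hz => hp z (by simp [hz])) hn
    have hb : (decide (pvKey x < pvKey q)) = false := by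
      simp only [pvKey, if_neg hq]
      split <;> simp
    rw [List.cons_append, pv_ins_cons, hb, ih']
    by_cases hx : x < 0 <;> simp [hx]

-- A's accumulator loop computes the two filters appended to the starting buckets
theorem pv_foldA (xs : List Int) : ∀ (n p : List Int),
    xs.foldl (fun (s : List Int × List Int) i =>
        if i < 0 then (s.1 ++ [i], s.2) else (s.1, s.2 ++ [i])) (n, p) =
      (n ++ xs.filter (fun x => decide (x < 0)), p ++ xs.filter (fun x => !decide (x < 0))) := by
  induction xs with
  | nil => intro n p; simp
  | cons x t ih =>
    intro n p
    by_cases hx : x < 0 <;> simp [hx, ih]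

-- B's insertion sort builds exactly 'non-negatives ++ negatives' (reverse induction)
theorem pv_foldB (xs : List Int) :
    xs.foldl (fun acc x => PySem.List.insertBy (fun a b => decide (pvKey a < pvKey b)) x acc) [] =
      xs.filter (fun x => !decide (x < 0)) ++ xs.filter (fun x => decide (x < 0)) := by
  induction xs using List.reverseRecOn with
  | nil => simp
  | append_singleton t x ih =>
    rw [List.foldl_append, List.foldl_cons, List.foldl_nil, ih,
      pv_insertBy_part x _ _ (by intro y hy; simpa using (List.of_mem_filter hy))
        (by intro y hy; simpa using (List.of_mem_filter hy))]
    by_cases hx : x < 0 <;> simp [hx, List.filter_append, List.append_assoc]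

-- B's port, characterised
theorem pv_sorted_part (xs : List Int) :
    segregate_elements_alt xs =
      xs.filter (fun x => !decide (x < 0)) ++ xs.filter (fun x => decide (x < 0)) := by
  rw [segregate_elements_alt, PySem.List.sorted_eq_foldl_insertBy]
  exact pv_foldB xs

-- ===== VERDICT (by name: the statement is the Claim_ definition above) =====
theorem segregate_elements_spec : Claim_equal_segregate_elements := by
  intro arr _
  show _ = _
  rw [segregate_elements, pv_sorted_part, pv_foldA]
  simp
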